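-- pv_equiv track=rewrite | github.com/ericmerle3789/Collatz-Junction-Theorem | scripts/research/r52_horner_mu.py | compute_slice_distribution_full
-- ===== SOURCE A (Python) =====
-- from math import comb, gcd, ceil, log2, sqrt, pi
-- from itertools import combinations_with_replacement
--
-- def compute_S(k):
--     """Minimal S such that 2^S > 3^k. Exact via integer comparison."""
--     S = ceil(k * log2(3))
--     three_k = 3 ** k
--     while (1 << S) <= three_k:
--         S += 1
--     while S > 0 and (1 << (S - 1)) > three_k:
--         S -= 1
--     return S
--
-- def compute_g(k, p):
--     """g = 2 * 3^{-1} mod p."""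
--     if gcd(3, p) != 1:
--         return None
--     return (2 * pow(3, -1, p)) % p
--
-- def compute_tail_distribution(k, p, b0, g=None):
--     """N^{tail}_{b0,r} = tail distribution.
--     T(B_tail) = Sum_{j=1}^{k-1} g^{j-1} * 2^{B_j}, B_j in [b0, max_B], B_{k-1}=max_B.
--     Returns: (count_array[p], C_{b0})
--     """
--     S_val = compute_S(k)
--     max_B = S_val - k
--     if g is None:
--         g = compute_g(k, p)
--
--     count = [0] * p
--
--     if k == 1:
--         if b0 == max_B:
--             count[0] += 1
--             return count, 1
--         return count, 0
--
--     if k == 2: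
--         r = pow(2, max_B, p)
--         count[r] += 1
--         return count, 1
--
--     # k >= 3: free components B_1,...,B_{k-2} in [b0, max_B], B_{k-1}=max_B forced
--     g_pows = [pow(g, j, p) for j in range(k - 1)]  # g^0 .. g^{k-2}
--     two_pows = [pow(2, b, p) for b in range(max_B + 1)]
--     last_term = (g_pows[k - 2] * two_pows[max_B]) % p
--     n_free = k - 2
--
--     n_vecs = 0
--     for combo in combinations_with_replacement(range(b0, max_B + 1), n_free):
--         res = 0
--         for idx, bj in enumerate(combo):
--             res = (res + g_pows[idx] * two_pows[bj]) % p
--         res = (res + last_term) % p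
--         count[res] += 1
--         n_vecs += 1
--
--     return count, n_vecs
--
-- def compute_slice_distribution_full(k, p, b0, g=None):
--     """N_{b0,r} including 2^{b0} shift: P_B = 2^{b0} + g*T."""
--     if g is None:
--         g = compute_g(k, p)
--
--     tail_dist, C_b0 = compute_tail_distribution(k, p, b0, g)
--     full_dist = [0] * p
--     shift = pow(2, b0, p)
--
--     for r_tail in range(p):
--         if tail_dist[r_tail] > 0:
--             r_full = (shift + g * r_tail) % p
--             full_dist[r_full] += tail_dist[r_tail]
--
--     return full_dist, C_b0
-- ===== SOURCE B (Python) =====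
-- from math import comb
--
-- def compute_slice_distribution_full(k, p, b0, g=None):
--     """Same distribution, computed by a DP over (suffix of the value range,
--     tuple length, residue mod p) instead of enumerating every non-decreasing
--     tuple; the vector count is the closed-form binomial."""
--     if g is None:
--         g = (2 * pow(3, -1, p)) % p
--
--     # minimal S with 2^S > 3^k
--     S, t, three_k = 0, 1, 3 ** k
--     while t <= three_k:
--         S += 1
--         t <<= 1
--     max_B = S - k
--
--     full = [0] * p
--     shift = pow(2, b0, p)
--
--     if k == 1:
--         if b0 != max_B:
--             return full, 0
--         full[shift % p] = 1
--         return full, 1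
--     if k == 2:
--         full[(shift + g * pow(2, max_B, p)) % p] = 1
--         return full, 1
--
--     if max_B < b0:
--         # no non-decreasing tuple fits in the empty range
--         return full, 0
--
--     n = k - 2
--     vals = list(range(b0, max_B + 1))
--     M = len(vals)
--
--     # T[j][r] = number of non-decreasing j-tuples over the current suffix of
--     # vals whose weighted residue sum_{idx} g^idx * 2^{B_idx} is r (mod p).
--     T = [[0] * p for _ in range(n + 1)]
--     T[0][0] = 1
--     for i in range(M - 1, -1, -1):
--         w = pow(2, vals[i], p)
--         newT = [T[0]]
--         for j in range(1, n + 1):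
--             vec = list(T[j])
--             prev = newT[j - 1]
--             for s in range(p):
--                 c = prev[s]
--                 if c:
--                     vec[(w + g * s) % p] += c
--             newT.append(vec)
--         T = newT
--
--     last_term = (pow(g, k - 2, p) * pow(2, max_B, p)) % p
--     for r in range(p):
--         c = T[n][r]
--         if c:
--             full[(shift + g * ((r + last_term) % p)) % p] += c
--     return full, comb(M + n - 1, n)
-- ===== Notes on version B (the rewrite author's own statement) =====
-- stated objective: alternative
-- what changed: Replaces the enumeration of all non-decreasing tuples (combinations_with_replacement, exponential in k) by a dynamic program over (suffix of the value range, tuple length, residue mod p) and a closed-form binomial for the vector count; the DP is polynomial (O(k*M*p)) where A is exponential, but scans all p residues per cell, so it trades away speed on inputs with few tuples and a large modulus.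
-- outside the precondition, e.g. on compute_slice_distribution_full(1, 3, 0, None): A returns ([0, 0, 0], 0), B raises ValueError; on compute_slice_distribution_full(3, 5, -1, None): A returns ([1, 1, 0, 2, 0], 4), B returns ([1, 1, 0, 1, 1], 4); on compute_slice_distribution_full(1, -2, 5, 1): A returns ([], 0), B returns ([], 0)
import Mathlib
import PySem

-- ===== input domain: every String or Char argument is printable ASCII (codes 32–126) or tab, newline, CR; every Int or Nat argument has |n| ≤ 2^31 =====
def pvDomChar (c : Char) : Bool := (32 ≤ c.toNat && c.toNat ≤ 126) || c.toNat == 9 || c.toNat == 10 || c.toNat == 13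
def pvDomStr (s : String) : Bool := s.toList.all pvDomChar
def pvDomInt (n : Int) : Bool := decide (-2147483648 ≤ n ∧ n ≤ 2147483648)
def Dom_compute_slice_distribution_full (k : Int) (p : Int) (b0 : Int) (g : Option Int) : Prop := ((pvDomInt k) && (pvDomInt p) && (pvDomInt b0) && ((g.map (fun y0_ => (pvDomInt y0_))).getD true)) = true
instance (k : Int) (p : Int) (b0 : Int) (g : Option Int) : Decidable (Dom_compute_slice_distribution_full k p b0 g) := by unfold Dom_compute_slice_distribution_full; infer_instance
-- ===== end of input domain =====

-- B replaces A's exponential enumeration of non-decreasing tuples by a residue DP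
-- over (suffix of the value range, tuple length, residue mod p) plus a closed-form
-- binomial for the vector count; equal on Pre_ (proved below).

-- ===== shared primitive helpers (used by both ports) =====

-- Python `lst[i] += d` / `lst[i] = v` on an in-range index (both programs only index in range inside Pre_).
def pvBump (l : List Int) (i : Int) (d : Int) : List Int :=
  PySem.List.pySetD l i (PySem.List.pyGetD l i 0 + d)

-- Hand port of Python `pow(3, -1, p)`: the modular inverse of 3 is the unique x in [0, p)
-- with 3*x % p = 1 (exact for p ≥ 1 when the inverse exists; 0 where Python raises, outside Pre_).
def pvInv3 (p : Int) : Int :=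
  ((PySem.List.pyRange 0 p 1).find? (fun x => PySem.Int.mod (3 * x) p == 1)).getD 0

-- ===== PORT A =====

-- compute_S's two correction loops. Python seeds S with ceil(k*log2(3)) (a float);
-- we seed with 2*k, an upper bound for k ≥ 1 — the loops make the result exact
-- (the unique S with 2^S > 3^k and (S = 0 or 2^(S-1) ≤ 3^k)) regardless of the seed.
def pvSUp (threeK : Int) : Nat → Nat → Nat
  | S, 0 => S
  | S, f+1 => if (2:Int)^S ≤ threeK then pvSUp threeK (S+1) f else S

def pvSDown (threeK : Int) : Nat → Nat
  | 0 => 0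
  | S+1 => if (2:Int)^S > threeK then pvSDown threeK S else S+1

def pvComputeS (k : Int) : Int :=
  let threeK : Int := 3 ^ k.toNat
  ((pvSDown threeK (pvSUp threeK (2*k.toNat) (k.toNat+2))) : Int)

-- compute_g
def pvComputeG (k p : Int) : Option Int :=
  if Int.gcd 3 p ≠ 1 then none else some (PySem.Int.mod (2 * pvInv3 p) p)

-- itertools.combinations_with_replacement(xs, n) in Python's order
def pvCWR : List Int → Nat → List (List Int)
  | _, 0 => [[]]
  | [], _+1 => []
  | x :: rest, n+1 => (pvCWR (x :: rest) n).map (fun t => x :: t) ++ pvCWR rest (n+1)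
  termination_by xs n => (n, xs.length)

-- compute_tail_distribution (pow(a, e, p) with e ≥ 0 is PySem.Int.powMod; exponents
-- and two_pows indices are ≥ 0 inside Pre_, so .toNat is exact there)
def pvComputeTail (k p b0 : Int) (g0 : Option Int) : List Int × Int :=
  let Sval := pvComputeS k
  let maxB := Sval - k
  let g := match g0 with | none => pvComputeG k p | some v => some v
  let count : List Int := List.replicate p.toNat 0
  if k = 1 then
    (if b0 = maxB then (pvBump count 0 1, 1) else (count, 0))
  else if k = 2 then
    let r := PySem.Int.powMod 2 maxB.toNat p
    (pvBump count r 1, 1)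
  else
    let gv := g.getD 0   -- g = None here would raise in Python; unreached inside Pre_
    let gPows := (PySem.List.pyRange 0 (k-1) 1).map (fun j => PySem.Int.powMod gv j.toNat p)
    let twoPows := (PySem.List.pyRange 0 (maxB+1) 1).map (fun b => PySem.Int.powMod 2 b.toNat p)
    let lastTerm := PySem.Int.mod (PySem.List.pyGetD gPows (k-2) 0 * PySem.List.pyGetD twoPows maxB 0) p
    let nFree := (k-2).toNat
    (pvCWR (PySem.List.pyRange b0 (maxB+1) 1) nFree).foldl
      (fun (st : List Int × Int) combo =>
        let r0 := (PySem.List.enumerate combo).foldl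
          (fun res ib =>
            PySem.Int.mod (res + PySem.List.pyGetD gPows ib.1 0 * PySem.List.pyGetD twoPows ib.2 0) p) 0
        (pvBump st.1 (PySem.Int.mod (r0 + lastTerm) p) 1, st.2 + 1))
      (count, 0)

def compute_slice_distribution_full (k : Int) (p : Int) (b0 : Int) (g : Option Int) : List Int × Int :=
  let g' := match g with | none => pvComputeG k p | some v => some v
  let td := pvComputeTail k p b0 g'
  let full : List Int := List.replicate p.toNat 0
  let shift := PySem.Int.powMod 2 b0.toNat p   -- b0 ≥ 0 inside Pre_
  let gv := g'.getD 0   -- g' = None is only read where Python raises, outside Pre_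
  ((PySem.List.pyRange 0 p 1).foldl
    (fun f r =>
      if PySem.List.pyGetD td.1 r 0 > 0 then
        pvBump f (PySem.Int.mod (shift + gv * r) p) (PySem.List.pyGetD td.1 r 0)
      else f) full,
   td.2)

-- ===== PORT B =====

-- B's `while t <= three_k: S += 1; t <<= 1`; fuel 2*k+2 bounds the loop for every k (exact).
def pvAltSAux (threeK : Int) : Nat → Nat → Int → Nat
  | 0, S, _ => S
  | f+1, S, t => if t ≤ threeK then pvAltSAux threeK f (S+1) (t <<< (1:Nat)) else S

def pvAltS (k : Int) : Int :=
  ((pvAltSAux (3 ^ k.toNat) (2*k.toNat+2) 0 1) : Int)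

-- B's inner `for s in range(p): c = prev[s]; if c: vec[(w + g*s) % p] += c`
def pvAltPush (p g w : Int) (prev vec : List Int) : List Int :=
  (PySem.List.pyRange 0 p 1).foldl
    (fun v s =>
      let c := PySem.List.pyGetD prev s 0
      if c ≠ 0 then pvBump v (PySem.Int.mod (w + g * s) p) c else v) vec

-- B's `newT = [T[0]]; for j in range(1, n+1): ... newT.append(vec)`
def pvAltStep (p g n w : Int) (T : List (List Int)) : List (List Int) :=
  (PySem.List.pyRange 1 (n+1) 1).foldl
    (fun newT j =>
      newT ++ [pvAltPush p g w (PySem.List.pyGetD newT (j-1) []) (PySem.List.pyGetD T j [])])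
    [PySem.List.pyGetD T 0 []]

def compute_slice_distribution_full_alt (k : Int) (p : Int) (b0 : Int) (g : Option Int) : List Int × Int :=
  let gv := match g with | none => PySem.Int.mod (2 * pvInv3 p) p | some v => v
  let maxB := pvAltS k - k
  let full : List Int := List.replicate p.toNat 0
  let shift := PySem.Int.powMod 2 b0.toNat p   -- b0 ≥ 0 inside Pre_
  if k = 1 then
    (if b0 ≠ maxB then (full, 0) else (PySem.List.pySetD full (PySem.Int.mod shift p) 1, 1))
  else if k = 2 then
    (PySem.List.pySetD full (PySem.Int.mod (shift + gv * PySem.Int.powMod 2 maxB.toNat p) p) 1, 1)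
  else if maxB < b0 then
    -- no non-decreasing tuple fits in the empty range
    (full, 0)
  else
    let n := k - 2
    let vals := PySem.List.pyRange b0 (maxB+1) 1
    let M : Int := PySem.List.len vals
    let T0 : List (List Int) := List.replicate (n.toNat+1) (List.replicate p.toNat 0)
    let T0 := PySem.List.pySetD T0 0 (PySem.List.pySetD (PySem.List.pyGetD T0 0 []) 0 1)
    let T := (PySem.List.pyRange (M-1) (-1) (-1)).foldl
      (fun T i =>
        pvAltStep p gv n (PySem.Int.powMod 2 (PySem.List.pyGetD vals i 0).toNat p) T) T0
    let lastTerm := PySem.Int.mod (PySem.Int.powMod gv (k-2).toNat p * PySem.Int.powMod 2 maxB.toNat p) p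
    let Tn := PySem.List.pyGetD T n []
    ((PySem.List.pyRange 0 p 1).foldl
      (fun f r =>
        let c := PySem.List.pyGetD Tn r 0
        if c ≠ 0 then
          pvBump f (PySem.Int.mod (shift + gv * (PySem.Int.mod (r + lastTerm) p)) p) c
        else f) full,
     ((M + n - 1).toNat.choose n.toNat : Int))

-- ===== PRECONDITION & SPEC =====
-- Pre_ excludes inputs on which A raises (k ≤ 0: ValueError/IndexError; p ≤ 0:
-- IndexError/ValueError except one degenerate k=1 corner returning ([], 0); g=None with
-- 3 | p: TypeError on the unset inverse, except the degenerate k=1 corner returning all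
-- zeros before g is read) and negative b0, where A's tail enumeration reads its power
-- table through Python negative-index WRAPAROUND (or raises IndexError) — an artefact
-- of A's implementation that B (which uses true modular powers) does not reproduce.
def Pre_compute_slice_distribution_full (k : Int) (p : Int) (b0 : Int) (g : Option Int) : Prop :=
  1 ≤ k ∧ 1 ≤ p ∧ 0 ≤ b0 ∧ (g = none → ¬ ((3:Int) ∣ p))
instance (k : Int) (p : Int) (b0 : Int) (g : Option Int) : Decidable (Pre_compute_slice_distribution_full k p b0 g) := by
  unfold Pre_compute_slice_distribution_full; infer_instance

def pvWitness_compute_slice_distribution_full : Int × Int × Int × Option Int := (3, 5, 0, none)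

def Spec_compute_slice_distribution_full (k : Int) (p : Int) (b0 : Int) (g : Option Int) (out : List Int × Int) : Prop := out = compute_slice_distribution_full_alt k p b0 g
instance (k : Int) (p : Int) (b0 : Int) (g : Option Int) (out : List Int × Int) : Decidable (Spec_compute_slice_distribution_full k p b0 g out) := by unfold Spec_compute_slice_distribution_full; infer_instance

-- ===== CLAIM (what is proved, stated in full; the proofs are below) =====
def Claim_equal_compute_slice_distribution_full : Prop := ∀ (k : Int) (p : Int) (b0 : Int) (g : Option Int), Dom_compute_slice_distribution_full k p b0 g → Pre_compute_slice_distribution_full k p b0 g → Spec_compute_slice_distribution_full k p b0 g (compute_slice_distribution_full k p b0 g)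

-- ===== LEMMAS AND PROOFS =====

-- ---- generic list/fold helpers ----

theorem pv_bump_length (l : List Int) (i d : Int) : (pvBump l i d).length = l.length := by
  simp [pvBump, PySem.List.length_pySetD]

theorem pv_getD_bump (l : List Int) (i d : Int) (h0 : 0 ≤ i) (h1 : i < (l.length : Int))
    (j : Int) (j0 : 0 ≤ j) (j1 : j < (l.length : Int)) :
    PySem.List.pyGetD (pvBump l i d) j 0 = if j = i then PySem.List.pyGetD l j 0 + d else PySem.List.pyGetD l j 0 := by
  lift i to ℕ using h0 with iN
  lift j to ℕ using j0 with jN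
  have hi : iN < l.length := by exact_mod_cast h1
  rw [pvBump, PySem.List.pyGetD_pySetD_natCast _ _ _ _ _ hi]
  by_cases hj : jN = iN <;> simp [hj]

theorem pv_bump_zero (l : List Int) (i : Int) (h0 : 0 ≤ i) :
    pvBump l i 0 = l := by
  rw [pvBump, add_zero, PySem.List.pySetD_of_nonneg _ _ h0, PySem.List.pyGetD_of_nonneg _ _ h0]
  by_cases h : i.toNat < l.length
  · rw [List.getD_eq_getElem _ _ h, List.set_getElem_self]
  · exact List.set_eq_of_length_le (by omega)

theorem pv_foldl_len {α : Type} (l : List α) (F : List Int → α → List Int)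
    (h : ∀ c x, (F c x).length = c.length) (c0 : List Int) :
    (l.foldl F c0).length = c0.length := by
  induction l generalizing c0 with
  | nil => rfl
  | cons x l ih => simpa [List.foldl_cons, h] using ih (F c0 x)

theorem pv_sum_filter_map {α : Type} (l : List α) (q : α → Bool) (d : α → Int) :
    ((l.filter q).map d).sum = (l.map (fun x => if q x then d x else 0)).sum := by
  induction l with
  | nil => simp
  | cons x l ih => by_cases h : q x <;> simp [h, ih]

theorem pv_foldl_bump {α : Type} (l : List α) (f d : α → Int) (c0 : List Int)
    (hf : ∀ x ∈ l, 0 ≤ f x ∧ f x < (c0.length : Int))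
    (i : Int) (i0 : 0 ≤ i) (i1 : i < (c0.length : Int)) :
    PySem.List.pyGetD (l.foldl (fun c x => pvBump c (f x) (d x)) c0) i 0
      = PySem.List.pyGetD c0 i 0 + ((l.filter (fun x => f x = i)).map d).sum := by
  induction l generalizing c0 with
  | nil => simp
  | cons x l ih =>
    have hx := hf x (List.mem_cons_self)
    have hlen : (pvBump c0 (f x) (d x)).length = c0.length := by
      simp [pvBump, PySem.List.length_pySetD]
    rw [List.foldl_cons, ih (pvBump c0 (f x) (d x)) (fun y hy => hlen ▸ hf y (List.mem_cons_of_mem _ hy)) (hlen ▸ i1),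
        pv_getD_bump _ _ _ hx.1 hx.2 _ i0 i1]
    by_cases h : f x = i
    · simp [List.filter_cons, h, if_pos h.symm]
      ring
    · have : ¬ i = f x := fun hh => h hh.symm
      simp [List.filter_cons, h, this]

theorem pv_foldl_bump_guard {α : Type} (l : List α) (f d : α → Int) (G : α → Prop)
    [DecidablePred G] (c0 : List Int)
    (hf : ∀ x ∈ l, 0 ≤ f x ∧ f x < (c0.length : Int))
    (hG : ∀ x ∈ l, ¬ G x → d x = 0)
    (i : Int) (i0 : 0 ≤ i) (i1 : i < (c0.length : Int)) :
    PySem.List.pyGetD (l.foldl (fun c x => if G x then pvBump c (f x) (d x) else c) c0) i 0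
      = PySem.List.pyGetD c0 i 0 + ((l.filter (fun x => f x = i)).map d).sum := by
  rw [PySem.List.foldl_congr_mem l _ (fun c x => pvBump c (f x) (d x)) c0 ?_]
  · exact pv_foldl_bump l f d c0 hf i i0 i1
  · intro acc x hx
    by_cases h : G x
    · simp [h]
    · simp [h, hG x hx h, pv_bump_zero _ _ (hf x hx).1]

theorem pv_sum_pick (L : List Int) (hnd : L.Nodup) (a : Int) (ha : a ∈ L) (f : Int → Int) :
    (L.map (fun s => if s = a then f s else 0)).sum = f a := by
  induction L with
  | nil => simp at ha
  | cons b L ih =>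
    by_cases hb : b = a
    · subst hb
      have hnotin : b ∉ L := (List.nodup_cons.mp hnd).1
      have hz : ∀ s ∈ L, (if s = b then f s else 0) = 0 := by
        intro s hs
        exact if_neg (fun hh : s = b => hnotin (hh ▸ hs))
      simp [List.map_congr_left hz]
    · have h : a ∈ L := (List.mem_cons.mp ha).resolve_left (fun hh => hb hh.symm)
      simp [hb, ih (List.nodup_cons.mp hnd).2 h]

theorem pv_collapse {α : Type} (l : List α) (F : α → Int) (φ : Int → Int) (r p : Int)
    (hF : ∀ t ∈ l, 0 ≤ F t ∧ F t < p) :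
    ((PySem.List.pyRange 0 p 1).map
        (fun s => if φ s = r then ((l.filter (fun t => F t = s)).length : Int) else 0)).sum
      = ((l.filter (fun t => φ (F t) = r)).length : Int) := by
  induction l with
  | nil => simp
  | cons t l ih =>
    have ht := hF t (List.mem_cons_self)
    have hmem : F t ∈ PySem.List.pyRange 0 p 1 := PySem.List.mem_pyRange_one.mpr ⟨ht.1, ht.2⟩
    have hstep : ∀ s ∈ PySem.List.pyRange 0 p 1,
        (if φ s = r then ((List.filter (fun x => decide (F x = s)) (t :: l)).length : Int) else 0)
        = (if φ s = r then ((List.filter (fun x => decide (F x = s)) l).length : Int) else 0)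
          + (if s = F t then (if φ s = r then 1 else 0) else 0) := by
      intro s _
      by_cases h1 : F t = s
      · subst h1
        simp [List.filter_cons]
        split <;> simp <;> ring
      · have h3 : ¬ s = F t := fun hh => h1 hh.symm
        simp [List.filter_cons, h1, h3]
    rw [List.map_congr_left hstep, PySem.List.sum_map_add_int,
        ih (fun y hy => hF y (List.mem_cons_of_mem _ hy)),
        pv_sum_pick _ (PySem.List.nodup_pyRange_one 0 p) (F t) hmem (fun s => if φ s = r then 1 else 0)]
    by_cases h : φ (F t) = r <;> simp [List.filter_cons, h]

-- ---- the exact S: both loops compute the unique S with 2^S > 3^k ≥ 2^(S-1) ----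

theorem pv_altSAux_spec (threeK : Int) (h1 : 1 ≤ threeK) :
    ∀ f S : Nat, threeK < 2^(S+f) → (S = 0 ∨ (2:Int)^(S-1) ≤ threeK) →
      threeK < 2^(pvAltSAux threeK f S (2^S)) ∧ (2:Int)^(pvAltSAux threeK f S (2^S) - 1) ≤ threeK := by
  intro f
  induction f with
  | zero =>
    intro S hlt hd
    refine ⟨by simpa using hlt, ?_⟩
    rcases hd with h | h
    · subst h; simpa using h1
    · simpa [pvAltSAux] using h
  | succ f ih =>
    intro S hlt hd
    rw [pvAltSAux]
    by_cases h : (2:Int)^S ≤ threeK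
    · rw [if_pos h]
      have hsh : (2:Int)^S <<< (1:Nat) = 2^(S+1) := by
        rw [Int.shiftLeft_eq]; ring
      rw [hsh]
      have hlt' : threeK < 2^((S+1)+f) := by
        have : (S+1)+f = S+(f+1) := by omega
        rw [this]; exact hlt
      exact ih (S+1) hlt' (Or.inr (by simpa using h))
    · rw [if_neg h]
      refine ⟨lt_of_not_ge h, ?_⟩
      rcases hd with h2 | h2
      · subst h2; simpa using h1
      · exact h2

theorem pv_sDown_spec (threeK : Int) (h1 : 1 ≤ threeK) :
    ∀ S : Nat, threeK < 2^S →
      threeK < 2^(pvSDown threeK S) ∧ (2:Int)^(pvSDown threeK S - 1) ≤ threeK := by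
  intro S
  induction S with
  | zero => intro h; exact ⟨by simpa using h, by simpa using h1⟩
  | succ S ih =>
    intro h
    rw [pvSDown]
    by_cases hgt : (2:Int)^S > threeK
    · rw [if_pos hgt]; exact ih hgt
    · rw [if_neg hgt]
      exact ⟨h, by simpa using not_lt.mp hgt⟩

theorem pv_S_unique (threeK : Int) (h1 : 1 ≤ threeK) (R1 R2 : Nat)
    (a1 : threeK < 2^R1) (b1 : (2:Int)^(R1-1) ≤ threeK)
    (a2 : threeK < 2^R2) (b2 : (2:Int)^(R2-1) ≤ threeK) : R1 = R2 := by
  by_contra hne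
  rcases Nat.lt_or_ge R1 R2 with h | h
  · have h2 : (2:Int)^R1 ≤ 2^(R2-1) := pow_le_pow_right₀ (by norm_num) (by omega)
    exact absurd (lt_of_lt_of_le a1 (le_trans h2 b2)) (lt_irrefl _)
  · have hlt : R2 < R1 := by omega
    have h2 : (2:Int)^R2 ≤ 2^(R1-1) := pow_le_pow_right₀ (by norm_num) (by omega)
    exact absurd (lt_of_lt_of_le a2 (le_trans h2 b1)) (lt_irrefl _)

theorem pv_threeK_lt (m : Nat) (hm : 1 ≤ m) : (3:Int)^m < 2^(2*m) := by
  have : (2:Int)^(2*m) = 4^m := by rw [pow_mul]; norm_num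
  rw [this]
  exact pow_lt_pow_left₀ (by norm_num) (by norm_num) (by omega)

theorem pv_threeK_pos (k : Int) : (1:Int) ≤ 3^k.toNat := one_le_pow₀ (by norm_num)

theorem pv_computeS_eq_sDown (k : Int) (hk : 1 ≤ k) :
    pvComputeS k = ((pvSDown (3^k.toNat) (2*k.toNat)) : Int) := by
  have hup : pvSUp (3^k.toNat) (2*k.toNat) (k.toNat+2) = 2*k.toNat := by
    have : ¬ ((2:Int)^(2*k.toNat) ≤ 3^k.toNat) :=
      not_le.mpr (pv_threeK_lt k.toNat (by omega))
    rw [show k.toNat+2 = (k.toNat+1)+1 from rfl, pvSUp, if_neg this]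
  rw [pvComputeS]
  simp only [hup]

theorem pv_S_char (k : Int) (hk : 1 ≤ k) :
    (3:Int)^k.toNat < 2^(pvComputeS k).toNat ∧ (2:Int)^((pvComputeS k).toNat - 1) ≤ 3^k.toNat := by
  rw [pv_computeS_eq_sDown k hk, Int.toNat_natCast]
  exact pv_sDown_spec _ (pv_threeK_pos k) _ (pv_threeK_lt k.toNat (by omega))

theorem pv_S_eq (k : Int) (hk : 1 ≤ k) : pvComputeS k = pvAltS k := by
  rw [pv_computeS_eq_sDown k hk, pvAltS]
  congr 1
  have c1 := pv_sDown_spec (3^k.toNat) (pv_threeK_pos k) (2*k.toNat) (pv_threeK_lt k.toNat (by omega))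
  have honeeq : (1:Int) = 2^(0:Nat) := by norm_num
  have c2 : (3:Int)^k.toNat < 2^(pvAltSAux (3^k.toNat) (2*k.toNat+2) 0 1) ∧
      (2:Int)^(pvAltSAux (3^k.toNat) (2*k.toNat+2) 0 1 - 1) ≤ 3^k.toNat := by
    rw [honeeq]
    refine pv_altSAux_spec _ (pv_threeK_pos k) (2*k.toNat+2) 0 ?_ (Or.inl rfl)
    calc (3:Int)^k.toNat < 2^(2*k.toNat) := pv_threeK_lt k.toNat (by omega)
      _ ≤ 2^(0+(2*k.toNat+2)) := pow_le_pow_right₀ (by norm_num) (by omega)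
  exact pv_S_unique _ (pv_threeK_pos k) _ _ c1.1 c1.2 c2.1 c2.2

theorem pv_S_gt (k : Int) (hk : 1 ≤ k) : k < pvComputeS k := by
  have hc := pv_S_char k hk
  have h23 : (2:Int)^k.toNat ≤ 3^k.toNat := pow_le_pow_left₀ (by norm_num) (by norm_num) _
  have hSpow : (2:Int)^k.toNat < 2^(pvComputeS k).toNat := lt_of_le_of_lt h23 hc.1
  have hS : k.toNat < (pvComputeS k).toNat := by
    by_contra hle
    exact absurd (pow_le_pow_right₀ (by norm_num : (1:Int) ≤ 2) (by omega : (pvComputeS k).toNat ≤ k.toNat)) (not_le.mpr hSpow)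
  have hnn : 0 ≤ pvComputeS k := by
    rw [pv_computeS_eq_sDown k hk]; positivity
  omega

-- ---- weighted sums, reference counts ----

def pvW (gv : Int) : List Int → Int
  | [] => 0
  | b :: t => 2 ^ b.toNat + gv * pvW gv t

def pvC (gv p : Int) (t : List Int) : Int := PySem.Int.mod (pvW gv t) p

def pvRef (gv p : Int) (xs : List Int) (j : Nat) (r : Int) : Int :=
  (((pvCWR xs j).filter (fun t => pvC gv p t = r)).length : Int)

theorem pv_mod_add_left (p a b : Int) (hp : 0 < p) :
    PySem.Int.mod (PySem.Int.mod a p + b) p = PySem.Int.mod (a + b) p := by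
  rw [PySem.Int.mod_eq_emod_of_pos hp, PySem.Int.mod_eq_emod_of_pos hp, PySem.Int.mod_eq_emod_of_pos hp]
  conv_rhs => rw [Int.add_emod]
  conv_lhs => rw [Int.add_emod, Int.emod_emod_of_dvd _ dvd_rfl]

theorem pv_mod_mul_right (p a b c : Int) (hp : 0 < p) :
    PySem.Int.mod (a + b * PySem.Int.mod c p) p = PySem.Int.mod (a + b * c) p := by
  rw [PySem.Int.mod_eq_emod_of_pos hp, PySem.Int.mod_eq_emod_of_pos hp, PySem.Int.mod_eq_emod_of_pos hp]
  conv_rhs => rw [Int.add_emod, Int.mul_emod]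
  conv_lhs => rw [Int.add_emod, Int.mul_emod, Int.emod_emod_of_dvd _ dvd_rfl]

theorem pv_mod_addmul (p acc u v : Int) (hp : 0 < p) :
    PySem.Int.mod (acc + PySem.Int.mod u p * PySem.Int.mod v p) p = PySem.Int.mod (acc + u * v) p := by
  rw [PySem.Int.mod_eq_emod_of_pos hp, PySem.Int.mod_eq_emod_of_pos hp, PySem.Int.mod_eq_emod_of_pos hp, PySem.Int.mod_eq_emod_of_pos hp]
  conv_rhs => rw [Int.add_emod, Int.mul_emod]
  conv_lhs => rw [Int.add_emod, Int.mul_emod, Int.emod_emod_of_dvd _ dvd_rfl, Int.emod_emod_of_dvd _ dvd_rfl]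


theorem pv_C_cons (gv p x : Int) (hp : 1 ≤ p) (t : List Int) :
    pvC gv p (x :: t) = PySem.Int.mod (PySem.Int.powMod 2 x.toNat p + gv * pvC gv p t) p := by
  rw [pvC, pvC, pvW, PySem.Int.powMod, pv_mod_mul_right p _ gv _ (by omega), pv_mod_add_left p _ _ (by omega)]

theorem pv_cwr_cons (x : Int) (rest : List Int) (n : Nat) :
    pvCWR (x :: rest) (n+1) = (pvCWR (x :: rest) n).map (fun t => x :: t) ++ pvCWR rest (n+1) := by
  rw [pvCWR]

theorem pv_cwr_length (xs : List Int) (n : Nat) :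
    (pvCWR xs n).length = (xs.length + n - 1).choose n := by
  induction xs, n using pvCWR.induct with
  | case1 xs => simp [pvCWR]
  | case2 n => simp [pvCWR, Nat.choose_eq_zero_of_lt (show n < n+1 by omega)]
  | case3 x rest n ih1 ih2 =>
    rw [pv_cwr_cons, List.length_append, List.length_map, ih1, ih2]
    simp only [List.length_cons]
    have h1 : rest.length + 1 + n - 1 = rest.length + n := by omega
    have h2 : rest.length + (n+1) - 1 = rest.length + n := by omega
    have h3 : rest.length + 1 + (n+1) - 1 = rest.length + n + 1 := by omega
    rw [h1, h2, h3, Nat.choose_succ_succ']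

theorem pv_mem_cwr (xs : List Int) (n : Nat) (t : List Int) (ht : t ∈ pvCWR xs n) :
    t.length = n ∧ ∀ x ∈ t, x ∈ xs := by
  induction xs, n using pvCWR.induct generalizing t with
  | case1 xs =>
    simp [pvCWR] at ht
    subst ht; simp
  | case2 n => simp [pvCWR] at ht
  | case3 x rest n ih1 ih2 =>
    rw [pv_cwr_cons, List.mem_append] at ht
    rcases ht with h | h
    · obtain ⟨t', ht', rfl⟩ := List.mem_map.mp h
      obtain ⟨hl, hm⟩ := ih1 t' ht'
      refine ⟨by simp [hl], ?_⟩
      intro y hy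
      rcases List.mem_cons.mp hy with rfl | hy
      · exact List.mem_cons_self
      · exact hm y hy
    · obtain ⟨hl, hm⟩ := ih2 t h
      exact ⟨hl, fun y hy => List.mem_cons_of_mem _ (hm y hy)⟩

theorem pv_ref_zero (gv p : Int) (xs : List Int) (r : Int) :
    pvRef gv p xs 0 r = if (0:Int) = r then 1 else 0 := by
  have h0 : pvC gv p [] = 0 := by simp [pvC, pvW, pysem]
  by_cases h : (0:Int) = r <;> simp [pvRef, pvCWR, h0, h] <;> omega

theorem pv_ref_nil (gv p : Int) (n : Nat) (r : Int) :
    pvRef gv p [] (n+1) r = 0 := by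
  simp [pvRef, pvCWR]

theorem pv_ref_cons (gv p x : Int) (hp : 1 ≤ p) (xs : List Int) (n : Nat) (r : Int) :
    pvRef gv p (x :: xs) (n+1) r =
      ((PySem.List.pyRange 0 p 1).map
        (fun s => if PySem.Int.mod (PySem.Int.powMod 2 x.toNat p + gv * s) p = r
                  then pvRef gv p (x :: xs) n s else 0)).sum
      + pvRef gv p xs (n+1) r := by
  have hcol := pv_collapse (pvCWR (x :: xs) n) (pvC gv p)
      (fun s => PySem.Int.mod (PySem.Int.powMod 2 x.toNat p + gv * s) p) r p
      (fun t _ => ⟨PySem.Int.mod_nonneg _ (by omega), PySem.Int.mod_lt _ (by omega)⟩)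
  simp only [pvRef]
  rw [pv_cwr_cons, List.filter_append, List.length_append]
  push_cast
  congr 1
  · rw [List.filter_map, List.length_map]
    have hfc : (pvCWR (x :: xs) n).filter ((fun t => decide (pvC gv p t = r)) ∘ (fun t => x :: t))
        = (pvCWR (x :: xs) n).filter (fun t => decide (PySem.Int.mod (PySem.Int.powMod 2 x.toNat p + gv * pvC gv p t) p = r)) := by
      apply List.filter_congr
      intro t _
      simp only [Function.comp_apply, pv_C_cons gv p x hp t]
    rw [hfc, ← hcol]

-- ---- the DP table invariant ----

def pvOK (gv p : Int) (n : Nat) (xs : List Int) (T : List (List Int)) : Prop :=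
  T.length = n+1 ∧ ∀ j : Nat, j ≤ n →
    (PySem.List.pyGetD T (j:Int) []).length = p.toNat ∧
    ∀ s : Int, 0 ≤ s → s < p →
      PySem.List.pyGetD (PySem.List.pyGetD T (j:Int) []) s 0 = pvRef gv p xs j s

theorem pv_push_getD (p gv w : Int) (hp : 1 ≤ p) (prev vec : List Int)
    (hv : vec.length = p.toNat) (r : Int) (r0 : 0 ≤ r) (r1 : r < p) :
    PySem.List.pyGetD (pvAltPush p gv w prev vec) r 0
      = PySem.List.pyGetD vec r 0 +
        ((PySem.List.pyRange 0 p 1).map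
          (fun s => if PySem.Int.mod (w + gv * s) p = r then PySem.List.pyGetD prev s 0 else 0)).sum := by
  have hlen : (vec.length : Int) = p := by rw [hv]; omega
  have hb := pv_foldl_bump_guard (PySem.List.pyRange 0 p 1)
      (fun s => PySem.Int.mod (w + gv * s) p) (fun s => PySem.List.pyGetD prev s 0)
      (fun s => PySem.List.pyGetD prev s 0 ≠ 0) vec
      (fun s _ => ⟨PySem.Int.mod_nonneg _ (by omega), by rw [hlen]; exact PySem.Int.mod_lt _ (by omega)⟩)
      (fun s _ h => not_not.mp h) r r0 (by rw [hlen]; exact r1)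
  simp only [pvAltPush]
  rw [hb, pv_sum_filter_map]
  simp

theorem pv_push_len (p gv w : Int) (prev vec : List Int) :
    (pvAltPush p gv w prev vec).length = vec.length := by
  simp only [pvAltPush]
  apply pv_foldl_len
  intro c x
  dsimp only
  split
  · exact pv_bump_length _ _ _
  · rfl

theorem pv_T0_OK (gv p : Int) (hp : 1 ≤ p) (n : Nat) :
    pvOK gv p n []
      (PySem.List.pySetD (List.replicate (n+1) (List.replicate p.toNat 0)) 0
        (PySem.List.pySetD (PySem.List.pyGetD (List.replicate (n+1) (List.replicate p.toNat 0)) 0 []) 0 1)) := by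
  have hrow0 : PySem.List.pyGetD (List.replicate (n+1) (List.replicate p.toNat (0:Int))) 0 [] = List.replicate p.toNat (0:Int) := by
    rw [List.replicate_succ, PySem.List.pyGetD_zero_cons]
  rw [hrow0]
  constructor
  · rw [PySem.List.length_pySetD, List.length_replicate]
  · intro j hj
    have hcast : (0:Int) = ((0:Nat):Int) := rfl
    have hT : PySem.List.pyGetD (PySem.List.pySetD (List.replicate (n+1) (List.replicate p.toNat (0:Int))) 0
        (PySem.List.pySetD (List.replicate p.toNat (0:Int)) 0 1)) (j:Int) []
        = if j = 0 then PySem.List.pySetD (List.replicate p.toNat (0:Int)) 0 1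
          else PySem.List.pyGetD (List.replicate (n+1) (List.replicate p.toNat (0:Int))) (j:Int) [] := by
      rw [hcast, PySem.List.pyGetD_pySetD_natCast _ _ _ _ _ (by simp)]
    rw [hT]
    rcases Nat.eq_zero_or_pos j with rfl | hjpos
    · rw [if_pos rfl]
      constructor
      · rw [PySem.List.length_pySetD, List.length_replicate]
      · intro s s0 s1
        lift s to ℕ using s0 with sN
        have hsN : sN < p.toNat := by omega
        rw [hcast, PySem.List.pyGetD_pySetD_natCast _ _ _ _ _ (by simp; omega), pv_ref_zero]
        by_cases hs : sN = 0
        · simp [hs]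
        · have hne : ¬ ((0:Int) = (sN:Int)) := by omega
          simp [hs, hne, List.getD_replicate]
    · rw [if_neg (by omega)]
      have hget : PySem.List.pyGetD (List.replicate (n+1) (List.replicate p.toNat (0:Int))) (j:Int) []
          = List.replicate p.toNat (0:Int) := by
        rw [PySem.List.pyGetD_natCast,
            List.getD_eq_getElem _ _ (by simpa using (show j < n+1 by omega)),
            List.getElem_replicate]
      rw [hget]
      refine ⟨List.length_replicate, ?_⟩
      intro s s0 s1
      obtain ⟨j', rfl⟩ : ∃ j', j = j'+1 := ⟨j-1, by omega⟩
      rw [pv_ref_nil]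
      lift s to ℕ using s0 with sN
      simp [List.getD_replicate]

theorem pv_step_OK (gv p x : Int) (hp : 1 ≤ p) (n : Nat) (xs : List Int) (T : List (List Int))
    (hT : pvOK gv p n xs T) :
    pvOK gv p n (x :: xs) (pvAltStep p gv (n:Int) (PySem.Int.powMod 2 x.toNat p) T) := by
  obtain ⟨hTlen, hTrow⟩ := hT
  have main : ∀ m : Nat, m ≤ n →
      (((PySem.List.pyRange 1 ((m:Int)+1) 1).foldl
        (fun newT j => newT ++ [pvAltPush p gv (PySem.Int.powMod 2 x.toNat p)
          (PySem.List.pyGetD newT (j-1) []) (PySem.List.pyGetD T j [])])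
        [PySem.List.pyGetD T 0 []]).length = m+1) ∧
      ∀ j : Nat, j ≤ m →
        (PySem.List.pyGetD ((PySem.List.pyRange 1 ((m:Int)+1) 1).foldl
          (fun newT j => newT ++ [pvAltPush p gv (PySem.Int.powMod 2 x.toNat p)
            (PySem.List.pyGetD newT (j-1) []) (PySem.List.pyGetD T j [])])
          [PySem.List.pyGetD T 0 []]) (j:Int) []).length = p.toNat ∧
        ∀ s : Int, 0 ≤ s → s < p →
          PySem.List.pyGetD (PySem.List.pyGetD ((PySem.List.pyRange 1 ((m:Int)+1) 1).foldl
            (fun newT j => newT ++ [pvAltPush p gv (PySem.Int.powMod 2 x.toNat p)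
              (PySem.List.pyGetD newT (j-1) []) (PySem.List.pyGetD T j [])])
            [PySem.List.pyGetD T 0 []]) (j:Int) []) s 0 = pvRef gv p (x :: xs) j s := by
    intro m
    induction m with
    | zero =>
      intro _
      rw [show ((0:Nat):Int)+1 = 1 by norm_num, PySem.List.pyRange_one_eq_nil (le_refl 1)]
      simp only [List.foldl_nil]
      refine ⟨by simp, ?_⟩
      intro j hj
      interval_cases j
      simp only [Nat.cast_zero, PySem.List.pyGetD_zero_cons]
      obtain ⟨hlen0, hrow0⟩ := hTrow 0 (by omega)
      simp only [Nat.cast_zero] at hlen0 hrow0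
      refine ⟨hlen0, ?_⟩
      intro s s0 s1
      rw [hrow0 s s0 s1, pv_ref_zero, pv_ref_zero]
    | succ m ih =>
      intro hm
      obtain ⟨ihlen, ihrow⟩ := ih (by omega)
      have hsplit : PySem.List.pyRange 1 (((m+1:Nat):Int)+1) 1
          = PySem.List.pyRange 1 ((m:Int)+1) 1 ++ [(m:Int)+1] := by
        have : ((m+1:Nat):Int)+1 = ((m:Int)+1)+1 := by push_cast; ring
        rw [this, PySem.List.pyRange_one_succ_right (by omega)]
      rw [hsplit, List.foldl_append, List.foldl_cons, List.foldl_nil]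
      set L := (PySem.List.pyRange 1 ((m:Int)+1) 1).foldl
          (fun newT j => newT ++ [pvAltPush p gv (PySem.Int.powMod 2 x.toNat p)
            (PySem.List.pyGetD newT (j-1) []) (PySem.List.pyGetD T j [])])
          [PySem.List.pyGetD T 0 []] with hL
      have hprev : PySem.List.pyGetD L ((m:Int)+1-1) [] = PySem.List.pyGetD L (m:Int) [] := by
        norm_num
      obtain ⟨hplen, hprow⟩ := ihrow m (by omega)
      have hvec : PySem.List.pyGetD T ((m:Int)+1) [] = PySem.List.pyGetD T ((m+1:Nat):Int) [] := by
        push_cast; ring_nf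
      obtain ⟨hvlen, hvrow⟩ := hTrow (m+1) (by omega)
      set N := pvAltPush p gv (PySem.Int.powMod 2 x.toNat p)
          (PySem.List.pyGetD L ((m:Int)+1-1) []) (PySem.List.pyGetD T ((m:Int)+1) []) with hN
      have hNlen : N.length = p.toNat := by
        rw [hN, pv_push_len, hvec, hvlen]
      have hNrow : ∀ r : Int, 0 ≤ r → r < p →
          PySem.List.pyGetD N r 0 = pvRef gv p (x :: xs) (m+1) r := by
        intro r r0 r1
        rw [hN, hprev, hvec]
        rw [pv_push_getD p gv _ hp _ _ hvlen r r0 r1]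
        have hmap : ∀ s ∈ PySem.List.pyRange 0 p 1,
            (if PySem.Int.mod (PySem.Int.powMod 2 x.toNat p + gv * s) p = r
             then PySem.List.pyGetD (PySem.List.pyGetD L (m:Int) []) s 0 else 0)
            = (if PySem.Int.mod (PySem.Int.powMod 2 x.toNat p + gv * s) p = r
               then pvRef gv p (x :: xs) m s else 0) := by
          intro s hs
          obtain ⟨s0, s1⟩ := PySem.List.mem_pyRange_one.mp hs
          rw [hprow s s0 s1]
        rw [List.map_congr_left hmap, hvrow r r0 r1, pv_ref_cons gv p x hp xs m r]
        ring
      refine ⟨by rw [List.length_append, ihlen, List.length_singleton], ?_⟩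
      intro j hj
      by_cases hjm : j ≤ m
      · have hjlt : j < L.length := by omega
        have hgj : PySem.List.pyGetD (L ++ [N]) (j:Int) [] = PySem.List.pyGetD L (j:Int) [] := by
          rw [PySem.List.pyGetD_natCast, PySem.List.pyGetD_natCast,
              List.getD_append _ _ _ _ hjlt]
        rw [hgj]
        exact ihrow j hjm
      · have hjeq : j = m+1 := by omega
        subst hjeq
        have hgj : PySem.List.pyGetD (L ++ [N]) ((m+1:Nat):Int) [] = N := by
          rw [PySem.List.pyGetD_natCast]
          have : (m+1:Nat) = L.length := by omega
          rw [this, List.getD_eq_getElem _ _ (by simp), List.getElem_append_right (by omega)]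
          simp
        rw [hgj]
        exact ⟨hNlen, hNrow⟩
  have hfin := main n (le_refl n)
  constructor
  · exact hfin.1
  · intro j hj
    exact hfin.2 j hj

theorem pv_outer_OK (gv p b0 hi : Int) (hp : 1 ≤ p) (n : Nat) :
    ∀ (m : Nat), m ≤ (PySem.List.pyRange b0 hi 1).length →
    ∀ T, pvOK gv p n ((PySem.List.pyRange b0 hi 1).drop m) T →
    pvOK gv p n (PySem.List.pyRange b0 hi 1)
      ((PySem.List.pyRange ((m:Int)-1) (-1) (-1)).foldl
        (fun T i => pvAltStep p gv (n:Int)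
          (PySem.Int.powMod 2 (PySem.List.pyGetD (PySem.List.pyRange b0 hi 1) i 0).toNat p) T) T) := by
  intro m
  induction m with
  | zero =>
    intro _ T hT
    rw [show ((0:Nat):Int)-1 = -1 by norm_num, PySem.List.pyRange_neg_one_eq_nil (le_refl (-1))]
    simpa using hT
  | succ m ih =>
    intro hm T hT
    have hcons : PySem.List.pyRange (((m+1:Nat):Int)-1) (-1) (-1)
        = (m:Int) :: PySem.List.pyRange ((m:Int)-1) (-1) (-1) := by
      have h1 : ((m+1:Nat):Int)-1 = (m:Int) := by push_cast; ring
      rw [h1, PySem.List.pyRange_neg_one_cons (by omega)]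
    rw [hcons, List.foldl_cons]
    have hmlt : m < (PySem.List.pyRange b0 hi 1).length := by omega
    have hgd : PySem.List.pyGetD (PySem.List.pyRange b0 hi 1) ((m:Int)) 0
        = (PySem.List.pyRange b0 hi 1)[m] := by
      rw [PySem.List.pyGetD_natCast, List.getD_eq_getElem _ _ hmlt]
    have hdrop : (PySem.List.pyRange b0 hi 1).drop m
        = (PySem.List.pyRange b0 hi 1)[m] :: (PySem.List.pyRange b0 hi 1).drop (m+1) :=
      (List.getElem_cons_drop hmlt).symm
    apply ih (by omega)
    rw [hgd]
    have := pv_step_OK gv p ((PySem.List.pyRange b0 hi 1)[m]) hp n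
        ((PySem.List.pyRange b0 hi 1).drop (m+1)) T hT
    rw [← hdrop] at this
    exact this

-- ---- A's inner residue loop ----

theorem pv_enumFold (k p maxB gv : Int) (hp : 1 ≤ p) (hk : 3 ≤ k) (hmB : 0 ≤ maxB) :
    ∀ (t : List Int) (j : Nat) (acc : Int), 0 ≤ acc → acc < p →
      (j:Int) + t.length ≤ k - 2 →
      (∀ x ∈ t, 0 ≤ x ∧ x ≤ maxB) →
      (PySem.List.enumerate t (j:Int)).foldl
        (fun res ib => PySem.Int.mod (res +
          PySem.List.pyGetD ((PySem.List.pyRange 0 (k-1) 1).map (fun j => PySem.Int.powMod gv j.toNat p)) ib.1 0 *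
          PySem.List.pyGetD ((PySem.List.pyRange 0 (maxB+1) 1).map (fun b => PySem.Int.powMod 2 b.toNat p)) ib.2 0) p) acc
      = PySem.Int.mod (acc + gv^j * pvW gv t) p := by
  intro t
  induction t with
  | nil =>
    intro j acc h0 h1 _ _
    simp only [PySem.List.enumerate_nil, List.foldl_nil, pvW]
    rw [mul_zero, add_zero, PySem.Int.mod_eq_emod_of_pos (by omega), Int.emod_eq_of_lt h0 h1]
  | cons x t ih =>
    intro j acc h0 h1 hlen hmem
    rw [PySem.List.enumerate_cons, List.foldl_cons]
    have hx := hmem x List.mem_cons_self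
    have hjb : ((j:Int)) < k - 1 := by
      simp only [List.length_cons] at hlen
      push_cast at hlen
      omega
    have hg1 : PySem.List.pyGetD ((PySem.List.pyRange 0 (k-1) 1).map (fun j => PySem.Int.powMod gv j.toNat p)) ((j:Int),x).1 0
        = PySem.Int.powMod gv j p := by
      rw [PySem.List.pyGetD_map_pyRange_of_nonneg _ _ _ _ (by positivity) hjb]
      simp
    have hg2 : PySem.List.pyGetD ((PySem.List.pyRange 0 (maxB+1) 1).map (fun b => PySem.Int.powMod 2 b.toNat p)) ((j:Int),x).2 0
        = PySem.Int.powMod 2 x.toNat p := by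
      rw [PySem.List.pyGetD_map_pyRange_of_nonneg _ _ _ _ hx.1 (by omega)]
    rw [hg1, hg2]
    have hstep : ((j:Int) + 1) = ((j+1 : Nat) : Int) := by push_cast; rfl
    rw [hstep]
    have hacc' : 0 ≤ PySem.Int.mod (acc + PySem.Int.powMod gv j p * PySem.Int.powMod 2 x.toNat p) p ∧
        PySem.Int.mod (acc + PySem.Int.powMod gv j p * PySem.Int.powMod 2 x.toNat p) p < p :=
      ⟨PySem.Int.mod_nonneg _ (by omega), PySem.Int.mod_lt _ (by omega)⟩
    rw [ih (j+1) _ hacc'.1 hacc'.2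
        (by simp only [List.length_cons] at hlen; push_cast at hlen ⊢; omega)
        (fun y hy => hmem y (List.mem_cons_of_mem _ hy))]
    rw [PySem.Int.powMod, PySem.Int.powMod, pv_mod_addmul p acc _ _ (by omega),
        pv_mod_add_left p _ _ (by omega), pvW]
    congr 1
    push_cast
    ring

-- ---- assembling the three branches ----

theorem pv_gcd_one (p : Int) (h : ¬ ((3:Int) ∣ p)) : Int.gcd 3 p = 1 := by
  have hd : Nat.gcd 3 p.natAbs ∣ 3 := Nat.gcd_dvd_left _ _
  rcases (Nat.Prime.eq_one_or_self_of_dvd Nat.prime_three _ hd) with h1 | h3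
  · exact h1
  · exfalso
    apply h
    have : (3:Nat) ∣ p.natAbs := h3 ▸ Nat.gcd_dvd_right 3 p.natAbs
    have h4 : ((3:Nat):Int) ∣ (p.natAbs : Int) := Int.natCast_dvd_natCast.mpr this
    simpa using (Int.dvd_natAbs.mp (by simpa using h4))



theorem pv_getD_repl (m : Nat) (r : Int) (r0 : 0 ≤ r) :
    PySem.List.pyGetD (List.replicate m (0:Int)) r 0 = 0 := by
  rw [PySem.List.pyGetD_of_nonneg _ _ r0]
  simp [List.getD_replicate]

theorem pv_fold_zero (p shift gv : Int) :
    (PySem.List.pyRange 0 p 1).foldl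
      (fun f r => if PySem.List.pyGetD (List.replicate p.toNat (0:Int)) r 0 > 0
                  then pvBump f (PySem.Int.mod (shift + gv * r) p) (PySem.List.pyGetD (List.replicate p.toNat (0:Int)) r 0)
                  else f) (List.replicate p.toNat 0)
    = List.replicate p.toNat 0 := by
  rw [PySem.List.foldl_congr_mem _ _ (fun f (_ : Int) => f) _ ?_]
  · induction (PySem.List.pyRange 0 p 1) with
    | nil => rfl
    | cons y l ih => rw [List.foldl_cons]; exact ih
  · intro acc r hr
    obtain ⟨r0, _⟩ := PySem.List.mem_pyRange_one.mp hr
    rw [pv_getD_repl _ _ r0]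
    norm_num

theorem pv_onehot (p shift gv a : Int) (hp : 1 ≤ p) (a0 : 0 ≤ a) (a1 : a < p) :
    (PySem.List.pyRange 0 p 1).foldl
      (fun f r => if PySem.List.pyGetD (pvBump (List.replicate p.toNat 0) a 1) r 0 > 0
                  then pvBump f (PySem.Int.mod (shift + gv * r) p) (PySem.List.pyGetD (pvBump (List.replicate p.toNat 0) a 1) r 0)
                  else f) (List.replicate p.toNat 0)
    = PySem.List.pySetD (List.replicate p.toNat 0) (PySem.Int.mod (shift + gv * a) p) 1 := by
  have hrl : (List.replicate p.toNat (0:Int)).length = p.toNat := List.length_replicate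
  have hrlI : ((List.replicate p.toNat (0:Int)).length : Int) = p := by rw [hrl]; omega
  have htail : ∀ r : Int, 0 ≤ r → r < p →
      PySem.List.pyGetD (pvBump (List.replicate p.toNat 0) a 1) r 0 = if r = a then 1 else 0 := by
    intro r r0 r1
    rw [pv_getD_bump _ _ _ a0 (by omega) r r0 (by omega)]
    rw [pv_getD_repl _ _ r0]
    norm_num
  have hidx : 0 ≤ PySem.Int.mod (shift + gv * a) p ∧ PySem.Int.mod (shift + gv * a) p < p :=
    ⟨PySem.Int.mod_nonneg _ (by omega), PySem.Int.mod_lt _ (by omega)⟩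
  apply List.ext_getElem
  · rw [PySem.List.length_pySetD, hrl]
    rw [pv_foldl_len]
    · exact hrl
    · intro c x
      dsimp only
      split
      · exact pv_bump_length _ _ _
      · rfl
  · intro i h1 h2
    have hiP : i < p.toNat := by
      rw [PySem.List.length_pySetD, hrl] at h2
      exact h2
    rw [← List.getD_eq_getElem _ 0 h1, ← List.getD_eq_getElem _ 0 h2,
        ← PySem.List.pyGetD_natCast, ← PySem.List.pyGetD_natCast]
    have hiI0 : (0:Int) ≤ (i:Int) := by positivity
    have hiIp : (i:Int) < p := by omega
    have hL := pv_foldl_bump_guard (PySem.List.pyRange 0 p 1)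
        (fun r => PySem.Int.mod (shift + gv * r) p)
        (fun r => PySem.List.pyGetD (pvBump (List.replicate p.toNat 0) a 1) r 0)
        (fun r => PySem.List.pyGetD (pvBump (List.replicate p.toNat 0) a 1) r 0 > 0)
        (List.replicate p.toNat 0)
        (fun r _ => ⟨PySem.Int.mod_nonneg _ (by omega), by rw [hrlI]; exact PySem.Int.mod_lt _ (by omega)⟩)
        (by
          intro r hr hnot
          obtain ⟨r0, r1⟩ := PySem.List.mem_pyRange_one.mp hr
          dsimp only at hnot ⊢
          rw [htail r r0 r1] at hnot ⊢
          by_cases hra : r = a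
          · rw [if_pos hra] at hnot; omega
          · rw [if_neg hra])
        (i:Int) hiI0 (by rw [hrlI]; exact hiIp)
    rw [hL, pv_getD_repl _ _ hiI0, pv_sum_filter_map]
    simp only [decide_eq_true_eq]
    have hmap : ∀ r ∈ PySem.List.pyRange 0 p 1,
        (if (fun r => PySem.Int.mod (shift + gv * r) p) r = (i:Int)
         then PySem.List.pyGetD (pvBump (List.replicate p.toNat 0) a 1) r 0 else 0)
        = (if r = a then (if PySem.Int.mod (shift + gv * r) p = (i:Int) then 1 else 0) else 0) := by
      intro r hr
      obtain ⟨r0, r1⟩ := PySem.List.mem_pyRange_one.mp hr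
      rw [htail r r0 r1]
      split_ifs <;> rfl
    rw [List.map_congr_left hmap,
        pv_sum_pick _ (PySem.List.nodup_pyRange_one 0 p) a (PySem.List.mem_pyRange_one.mpr ⟨a0, a1⟩),
        zero_add]
    have hidxN : PySem.Int.mod (shift + gv * a) p = (((PySem.Int.mod (shift + gv * a) p).toNat : Nat) : Int) :=
      (Int.toNat_of_nonneg hidx.1).symm
    conv_rhs => rw [hidxN]
    rw [PySem.List.pyGetD_pySetD_natCast _ _ _ _ _ (by rw [hrl]; omega)]
    by_cases hcase : i = (PySem.Int.mod (shift + gv * a) p).toNat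
    · rw [if_pos hcase, if_pos (by omega)]
    · rw [if_neg hcase, if_neg (by omega), pv_getD_repl _ _ hiI0]

theorem pv_pairfold {α : Type} (l : List α) (F : α → Int) (c0 : List Int) (m0 : Int) :
    List.foldl (fun (st : List Int × Int) e => (pvBump st.1 (F e) 1, st.2 + 1)) (c0, m0) l
      = (List.foldl (fun c e => pvBump c (F e) 1) c0 l, m0 + (l.length : Int)) := by
  induction l generalizing c0 m0 with
  | nil => simp
  | cons x l ih =>
    rw [List.foldl_cons, List.foldl_cons, ih]
    simp only [List.length_cons]
    congr 1
    push_cast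
    ring

theorem pv_core_k3 (k p b0 gv : Int)
    (hk3 : 3 ≤ k) (hp : 1 ≤ p) (hb : 0 ≤ b0) :
    compute_slice_distribution_full k p b0 (some gv) = compute_slice_distribution_full_alt k p b0 (some gv) := by
  have hk1 : ¬ (k = 1) := by omega
  have hk2 : ¬ (k = 2) := by omega
  simp only [compute_slice_distribution_full, compute_slice_distribution_full_alt,
    pvComputeTail, Option.getD_some, if_neg hk1, if_neg hk2, PySem.List.len_eq]
  rw [← pv_S_eq k (by omega)]
  set nF := (k-2).toNat with hnF
  have hnFc : ((nF : Nat) : Int) = k - 2 := by rw [hnF]; omega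
  set maxB := pvComputeS k - k with hmB
  have hSgt := pv_S_gt k (by omega)
  have hmB1 : 1 ≤ maxB := by omega
  set vals := PySem.List.pyRange b0 (maxB+1) 1 with hvals
  set GP := List.map (fun j => PySem.Int.powMod gv j.toNat p) (PySem.List.pyRange 0 (k - 1) 1) with hGP
  set TP := List.map (fun b => PySem.Int.powMod 2 b.toNat p) (PySem.List.pyRange 0 (maxB + 1) 1) with hTP
  set combos := pvCWR vals nF with hcombos
  have hgA : PySem.List.pyGetD GP (k-2) 0 = PySem.Int.powMod gv nF p := by
    rw [hGP, PySem.List.pyGetD_map_pyRange_of_nonneg _ (k-1) (k-2) 0 (by omega) (by omega), ← hnF]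
  have htA : PySem.List.pyGetD TP maxB 0 = PySem.Int.powMod 2 maxB.toNat p := by
    rw [hTP, PySem.List.pyGetD_map_pyRange_of_nonneg _ (maxB+1) maxB 0 (by omega) (by omega)]
  rw [hgA, htA]
  set lastT := PySem.Int.mod (PySem.Int.powMod gv nF p * PySem.Int.powMod 2 maxB.toNat p) p with hlastT
  rw [← hnFc]
  by_cases hM : maxB < b0
  case pos =>
    rw [if_pos hM]
    have hemptyrange : vals = [] := by
      rw [hvals]; exact PySem.List.pyRange_one_eq_nil (by omega)
    obtain ⟨nF', hnF'⟩ : ∃ m, nF = m+1 := ⟨nF-1, by omega⟩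
    have hcombos0 : combos = [] := by rw [hcombos, hemptyrange, hnF']; rw [pvCWR]
    rw [hcombos0]
    simp only [List.foldl_nil]
    exact congrArg₂ Prod.mk (pv_fold_zero p _ _) rfl
  case neg =>
  rw [if_neg hM]
  have hsplit := pv_pairfold combos
      (fun combo => PySem.Int.mod
        (List.foldl (fun res ib => PySem.Int.mod (res + PySem.List.pyGetD GP ib.1 0 * PySem.List.pyGetD TP ib.2 0) p)
          0 (PySem.List.enumerate combo) + lastT) p)
      (List.replicate p.toNat 0) 0
  rw [hsplit]
  dsimp only
  refine congrArg₂ Prod.mk ?_ ?_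
  case _ =>
    -- the two per-residue distributions agree
    set TL := List.foldl
        (fun c e =>
          pvBump c
            (PySem.Int.mod
              (List.foldl
                  (fun res ib => PySem.Int.mod (res + PySem.List.pyGetD GP ib.1 0 * PySem.List.pyGetD TP ib.2 0) p) 0
                  (PySem.List.enumerate e) +
                lastT)
              p)
            1)
        (List.replicate p.toNat 0) combos with hTL
    set TB := List.foldl
        (fun T i => pvAltStep p gv (↑nF) (PySem.Int.powMod 2 (PySem.List.pyGetD vals i 0).toNat p) T)
        (PySem.List.pySetD (List.replicate (nF + 1) (List.replicate p.toNat 0)) 0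
          (PySem.List.pySetD (PySem.List.pyGetD (List.replicate (nF + 1) (List.replicate p.toNat 0)) 0 []) 0 1))
        (PySem.List.pyRange (↑vals.length - 1) (-1) (-1)) with hTB
    have hOK : pvOK gv p nF vals TB := by
      have h0 : pvOK gv p nF ((PySem.List.pyRange b0 (maxB+1) 1).drop (PySem.List.pyRange b0 (maxB+1) 1).length)
          (PySem.List.pySetD (List.replicate (nF + 1) (List.replicate p.toNat 0)) 0
            (PySem.List.pySetD (PySem.List.pyGetD (List.replicate (nF + 1) (List.replicate p.toNat 0)) 0 []) 0 1)) := by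
        rw [List.drop_length]
        exact pv_T0_OK gv p hp nF
      exact pv_outer_OK gv p b0 (maxB+1) hp nF (PySem.List.pyRange b0 (maxB+1) 1).length (le_refl _) _ h0
    obtain ⟨hTnlen, hTnrow⟩ := hOK.2 nF (le_refl nF)
    have hRES_eq : ∀ t ∈ combos,
        PySem.Int.mod
          (List.foldl
              (fun res ib => PySem.Int.mod (res + PySem.List.pyGetD GP ib.1 0 * PySem.List.pyGetD TP ib.2 0) p) 0
              (PySem.List.enumerate t) +
            lastT) p
        = PySem.Int.mod (pvC gv p t + lastT) p := by
      intro t ht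
      obtain ⟨hlen_t, hmem_t⟩ := pv_mem_cwr vals nF t (hcombos ▸ ht)
      have h1 : List.foldl
          (fun res ib => PySem.Int.mod (res + PySem.List.pyGetD GP ib.1 0 * PySem.List.pyGetD TP ib.2 0) p) 0
          (PySem.List.enumerate t) = pvC gv p t := by
        rw [hGP, hTP]
        have h2 := pv_enumFold k p maxB gv hp hk3 (by omega) t 0 0 (le_refl 0) (by omega)
          (by rw [hlen_t]; push_cast; omega)
          (by
            intro x hx
            have hxv := hmem_t x hx
            rw [hvals] at hxv
            obtain ⟨hx1, hx2⟩ := PySem.List.mem_pyRange_one.mp hxv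
            exact ⟨by omega, by omega⟩)
        simp only [Nat.cast_zero, pow_zero, one_mul, zero_add] at h2
        exact h2
      rw [h1]
    have htailA : ∀ r : Int, 0 ≤ r → r < p →
        PySem.List.pyGetD TL r 0
          = ((combos.filter (fun t => PySem.Int.mod (pvC gv p t + lastT) p = r)).length : Int) := by
      intro r r0 r1
      have hbump := pv_foldl_bump combos
          (fun e => PySem.Int.mod
            (List.foldl
                (fun res ib => PySem.Int.mod (res + PySem.List.pyGetD GP ib.1 0 * PySem.List.pyGetD TP ib.2 0) p) 0
                (PySem.List.enumerate e) + lastT) p)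
          (fun _ => (1:Int)) (List.replicate p.toNat 0)
          (fun e _ => ⟨PySem.Int.mod_nonneg _ (by omega), by
            rw [List.length_replicate]
            have : ((p.toNat : Nat) : Int) = p := by omega
            rw [this]
            exact PySem.Int.mod_lt _ (by omega)⟩)
          r r0 (by rw [List.length_replicate]; omega)
      rw [hTL]
      rw [hbump, pv_getD_repl _ _ r0, PySem.List.sum_map_const_int, zero_add, mul_one]
      congr 1
      congr 1
      apply List.filter_congr
      intro t ht
      simp only [hRES_eq t ht]
    have hfilterTn : ∀ r : Int, 0 ≤ r → r < p →
        PySem.List.pyGetD (PySem.List.pyGetD TB (↑nF) []) r 0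
          = ((combos.filter (fun t => pvC gv p t = r)).length : Int) := by
      intro r r0 r1
      rw [hTnrow r r0 r1, pvRef, hcombos]
    apply List.ext_getElem
    · rw [pv_foldl_len _ _ (by
        intro c x
        split
        · exact pv_bump_length _ _ _
        · rfl), pv_foldl_len _ _ (by
        intro c x
        split
        · exact pv_bump_length _ _ _
        · rfl)]
    · intro i h1 h2
      have hiP : i < p.toNat := by
        rw [pv_foldl_len _ _ (by
          intro c x
          split
          · exact pv_bump_length _ _ _
          · rfl), List.length_replicate] at h1
        exact h1
      have hiI0 : (0:Int) ≤ (i:Int) := by positivity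
      have hiIp : (i:Int) < p := by omega
      rw [← List.getD_eq_getElem _ 0 h1, ← List.getD_eq_getElem _ 0 h2,
          ← PySem.List.pyGetD_natCast, ← PySem.List.pyGetD_natCast]
      have hrepl : ((List.replicate p.toNat (0:Int)).length : Int) = p := by
        rw [List.length_replicate]; omega
      have hLA := pv_foldl_bump_guard (PySem.List.pyRange 0 p 1)
          (fun r => PySem.Int.mod (PySem.Int.powMod 2 b0.toNat p + gv * r) p)
          (fun r => PySem.List.pyGetD TL r 0)
          (fun r => PySem.List.pyGetD TL r 0 > 0)
          (List.replicate p.toNat 0)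
          (fun r _ => ⟨PySem.Int.mod_nonneg _ (by omega), by rw [hrepl]; exact PySem.Int.mod_lt _ (by omega)⟩)
          (by
            intro r hr hnot
            obtain ⟨r0, r1⟩ := PySem.List.mem_pyRange_one.mp hr
            dsimp only at hnot ⊢
            rw [htailA r r0 r1] at hnot ⊢
            omega)
          (i:Int) hiI0 (by rw [hrepl]; exact hiIp)
      have hLB := pv_foldl_bump_guard (PySem.List.pyRange 0 p 1)
          (fun r => PySem.Int.mod (PySem.Int.powMod 2 b0.toNat p + gv * PySem.Int.mod (r + lastT) p) p)
          (fun r => PySem.List.pyGetD (PySem.List.pyGetD TB (↑nF) []) r 0)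
          (fun r => PySem.List.pyGetD (PySem.List.pyGetD TB (↑nF) []) r 0 ≠ 0)
          (List.replicate p.toNat 0)
          (fun r _ => ⟨PySem.Int.mod_nonneg _ (by omega), by rw [hrepl]; exact PySem.Int.mod_lt _ (by omega)⟩)
          (fun r _ h => not_not.mp h)
          (i:Int) hiI0 (by rw [hrepl]; exact hiIp)
      rw [hLA, hLB, pv_getD_repl _ _ hiI0, pv_sum_filter_map, pv_sum_filter_map]
      simp only [decide_eq_true_eq]
      have hmapA : ∀ r ∈ PySem.List.pyRange 0 p 1,
          (if PySem.Int.mod (PySem.Int.powMod 2 b0.toNat p + gv * r) p = (i:Int)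
           then PySem.List.pyGetD TL r 0 else 0)
          = (if (fun s => PySem.Int.mod (PySem.Int.powMod 2 b0.toNat p + gv * s) p) r = (i:Int)
             then ((combos.filter
               (fun t => (fun t => PySem.Int.mod (pvC gv p t + lastT) p) t = r)).length : Int) else 0) := by
        intro r hr
        obtain ⟨r0, r1⟩ := PySem.List.mem_pyRange_one.mp hr
        rw [htailA r r0 r1]
      have hmapB : ∀ r ∈ PySem.List.pyRange 0 p 1,
          (if PySem.Int.mod (PySem.Int.powMod 2 b0.toNat p + gv * PySem.Int.mod (r + lastT) p) p = (i:Int)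
           then PySem.List.pyGetD (PySem.List.pyGetD TB (↑nF) []) r 0 else 0)
          = (if (fun s => PySem.Int.mod (PySem.Int.powMod 2 b0.toNat p + gv * PySem.Int.mod (s + lastT) p) p) r = (i:Int)
             then ((combos.filter (fun t => pvC gv p t = r)).length : Int) else 0) := by
        intro r hr
        obtain ⟨r0, r1⟩ := PySem.List.mem_pyRange_one.mp hr
        rw [hfilterTn r r0 r1]
      rw [List.map_congr_left hmapA, List.map_congr_left hmapB,
          pv_collapse combos (fun t => PySem.Int.mod (pvC gv p t + lastT) p)
            (fun s => PySem.Int.mod (PySem.Int.powMod 2 b0.toNat p + gv * s) p) (i:Int) p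
            (fun t _ => ⟨PySem.Int.mod_nonneg _ (by omega), PySem.Int.mod_lt _ (by omega)⟩),
          pv_collapse combos (pvC gv p)
            (fun s => PySem.Int.mod (PySem.Int.powMod 2 b0.toNat p + gv * PySem.Int.mod (s + lastT) p) p) (i:Int) p
            (fun t _ => ⟨PySem.Int.mod_nonneg _ (by omega), PySem.Int.mod_lt _ (by omega)⟩)]
  case _ =>
    rw [zero_add, hcombos, pv_cwr_length]
    have hc1 : (((vals.length : Int)) + (nF : Int) - 1).toNat = vals.length + nF - 1 := by omega
    rw [hc1]

theorem pv_core (k p b0 gv : Int) (hk : 1 ≤ k) (hp : 1 ≤ p) (hb : 0 ≤ b0) :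
    compute_slice_distribution_full k p b0 (some gv) = compute_slice_distribution_full_alt k p b0 (some gv) := by
  by_cases hk1 : k = 1
  · subst hk1
    have hS1 : pvComputeS 1 = 2 := by decide
    have hA1 : pvAltS 1 = 2 := by decide
    simp only [compute_slice_distribution_full, compute_slice_distribution_full_alt,
      pvComputeTail, Option.getD_some, hS1, hA1]
    norm_num
    by_cases hb1 : b0 = 1
    · simp only [if_pos hb1]
      have h1 := pv_onehot p (PySem.Int.powMod 2 b0.toNat p) gv 0 hp (le_refl 0) (by omega)
      rw [mul_zero, add_zero] at h1
      exact Prod.ext h1 rfl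
    · simp only [if_neg hb1]
      exact Prod.ext (pv_fold_zero p _ _) rfl
  · by_cases hk2 : k = 2
    · subst hk2
      have hS2 : pvComputeS 2 = 4 := by decide
      have hA2 : pvAltS 2 = 4 := by decide
      simp only [compute_slice_distribution_full, compute_slice_distribution_full_alt,
        pvComputeTail, Option.getD_some, hS2, hA2]
      norm_num
      exact pv_onehot p (PySem.Int.powMod 2 b0.toNat p) gv
        (PySem.Int.powMod 2 (Int.toNat 2) p) hp
        (PySem.Int.mod_nonneg _ (by omega)) (PySem.Int.mod_lt _ (by omega))
    · exact pv_core_k3 k p b0 gv (by omega) hp hb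

theorem pv_main (k p b0 : Int) (g : Option Int)
    (hk : 1 ≤ k) (hp : 1 ≤ p) (hb : 0 ≤ b0) (hg : g = none → ¬ ((3:Int) ∣ p)) :
    compute_slice_distribution_full k p b0 g = compute_slice_distribution_full_alt k p b0 g := by
  cases g with
  | some v => exact pv_core k p b0 v hk hp hb
  | none =>
    have hG : pvComputeG k p = some (PySem.Int.mod (2 * pvInv3 p) p) := by
      simp [pvComputeG, pv_gcd_one p (hg rfl)]
    have eA : compute_slice_distribution_full k p b0 none
        = compute_slice_distribution_full k p b0 (some (PySem.Int.mod (2 * pvInv3 p) p)) := by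
      simp only [compute_slice_distribution_full, hG]
    have eB : compute_slice_distribution_full_alt k p b0 none
        = compute_slice_distribution_full_alt k p b0 (some (PySem.Int.mod (2 * pvInv3 p) p)) := by
      simp only [compute_slice_distribution_full_alt]
    rw [eA, eB]
    exact pv_core k p b0 _ hk hp hb

-- ===== VERDICT (by name: the statement is the Claim_ definition above) =====
theorem compute_slice_distribution_full_spec : Claim_equal_compute_slice_distribution_full := by
  intro k p b0 g _ hpre
  unfold Spec_compute_slice_distribution_full
  exact pv_main k p b0 g hpre.1 hpre.2.1 hpre.2.2.1 hpre.2.2.2
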